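-- pv_equiv track=rewrite | github.com/itaygil135/Introduction-to-Computer-Science | z-extra/ex8_targil/nonogram.py | intersection_row
-- ===== SOURCE A (Python) =====
-- def intersection_row(rows):
--     """
--     This function create one row that contains the common cells at a list
--     of given rows
--     :param rows: list of rows with marked cells
--     :return:     one row that only the common cells are marked.
--     """
--     combined_list = []
--     for i in range(len(rows[0])):
--         is_different = False
--         for item in rows:
--             if rows[0][i] != item[i]:
--                 combined_list.append(-1)
--                 is_different = True
--                 break
--         if not is_different:
--             combined_list.append(rows[0][i])
--     return combined_list
-- ===== SOURCE B (Python) =====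
-- def intersection_row(rows):
--     combined_list = []
--     for i in range(len(rows[0])):
--         col = [row[i] for row in rows]
--         combined_list.append(col[0] if len(set(col)) == 1 else -1)
--     return combined_list
-- ===== Notes on version B (the rewrite author's own statement) =====
-- stated objective: idiomatic
-- what changed: Replaces the compare-every-cell-to-the-first-row-with-early-break inner loop by collecting each column into a list and testing whether its set of distinct values has exactly one element.
-- outside the precondition, e.g. on intersection_row([]): A raises IndexError, B raises IndexError; on intersection_row([[1, 2], [3, 4], [5]]): A returns [-1, -1], B raises IndexError
import Mathlib
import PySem

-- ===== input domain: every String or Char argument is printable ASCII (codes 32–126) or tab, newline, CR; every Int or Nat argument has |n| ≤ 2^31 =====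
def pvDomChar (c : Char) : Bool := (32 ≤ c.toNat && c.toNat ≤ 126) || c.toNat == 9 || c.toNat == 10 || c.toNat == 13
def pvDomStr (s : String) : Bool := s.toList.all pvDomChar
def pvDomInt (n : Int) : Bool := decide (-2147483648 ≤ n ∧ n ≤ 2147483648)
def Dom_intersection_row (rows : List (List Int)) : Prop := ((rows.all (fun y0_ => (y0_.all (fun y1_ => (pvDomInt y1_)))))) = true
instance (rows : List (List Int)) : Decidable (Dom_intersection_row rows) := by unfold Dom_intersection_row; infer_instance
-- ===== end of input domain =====

-- B replaces A's compare-to-first-cell-with-early-break inner loop by building each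
-- column and testing whether its set of distinct values is a singleton (more idiomatic).


-- ===== PORT A =====
-- inner 'for item in rows: if rows[0][i] != item[i]: … break' as a Bool-returning scan
def pvRowDiff (first : List Int) (i : Nat) : List (List Int) → Bool
  | [] => false
  | item :: rest =>
      if first.getD i 0 ≠ item.getD i 0 then true else pvRowDiff first i rest

def intersection_row (rows : List (List Int)) : List Int :=
  let first := rows.headD []
  (List.range first.length).foldl
    (fun acc i =>
      if pvRowDiff first i rows then acc ++ [-1] else acc ++ [first.getD i 0]) []

-- ===== PORT B =====
def intersection_row_alt (rows : List (List Int)) : List Int :=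
  let first := rows.headD []
  (List.range first.length).foldl
    (fun acc i =>
      let col := rows.map (fun row => row.getD i 0)
      acc ++ [if (PySem.Set.ofList col).length = 1 then col.headD 0 else -1]) []

-- ===== PRECONDITION & SPEC =====
-- Pre_ excludes the empty list (A raises IndexError on rows[0]) and ragged inputs with a
-- row shorter than rows[0]: on those B raises IndexError while reading the full column,
-- and A either raises too or returns only via its early break (e.g. [[1,2],[3,4],[5]]).
def Pre_intersection_row (rows : List (List Int)) : Prop :=
  rows ≠ [] ∧ ∀ row ∈ rows, (rows.headD []).length ≤ row.length
instance (rows : List (List Int)) : Decidable (Pre_intersection_row rows) := by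
  unfold Pre_intersection_row; infer_instance

def pvWitness_intersection_row : List (List Int) := [[1, 2, 3], [1, 5, 3]]

def Spec_intersection_row (rows : List (List Int)) (out : List Int) : Prop := out = intersection_row_alt rows
instance (rows : List (List Int)) (out : List Int) : Decidable (Spec_intersection_row rows out) := by unfold Spec_intersection_row; infer_instance

-- ===== CLAIM (what is proved, stated in full; the proofs are below) =====
def Claim_equal_intersection_row : Prop := ∀ (rows : List (List Int)), Dom_intersection_row rows → Pre_intersection_row rows → Spec_intersection_row rows (intersection_row rows)

-- ===== LEMMAS AND PROOFS =====

-- A's inner scan returns false exactly when every row agrees with the first row at column i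
lemma pvRowDiff_eq_false_iff (f : List Int) (i : Nat) (rs : List (List Int)) :
    pvRowDiff f i rs = false ↔ ∀ item ∈ rs, f.getD i 0 = item.getD i 0 := by
  induction rs with
  | nil => simp [pvRowDiff]
  | cons r t ih =>
      by_cases h : f.getD i 0 = r.getD i 0 <;> simp [pvRowDiff, h, ih]  -- h used in the pos branch only

-- set(col) is a singleton exactly when every element of the column equals its head
lemma ofList_len_one_iff (a : Int) (t : List Int) :
    (PySem.Set.ofList (a :: t)).length = 1 ↔ ∀ x ∈ t, x = a := by
  constructor
  · intro h
    obtain ⟨y, hy⟩ := List.length_eq_one_iff.mp h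
    have ha : a = y := by
      have := (PySem.Set.mem_ofList (a :: t) a).mpr (by simp)
      simpa [hy] using this
    intro x hx
    have hxm := (PySem.Set.mem_ofList (a :: t) x).mpr (by simp [hx])
    rw [hy] at hxm
    simp at hxm
    omega
  · intro h
    have key : ∀ (s : List Int), (∀ x ∈ s, x = a) →
        s.foldl PySem.Set.add ([a] : PySem.Set Int) = [a] := by
      intro s
      induction s with
      | nil => intro _; rfl
      | cons b u ih =>
          intro hs
          have hb : b = a := hs b (by simp)
          subst hb
          have : PySem.Set.add ([b] : PySem.Set Int) b = [b] := by
            simp [PySem.Set.add, PySem.Set.contains]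
          rw [List.foldl_cons, this]
          exact ih (fun x hx => hs x (by simp [hx]))
    have h0 : PySem.Set.ofList (a :: t) = t.foldl PySem.Set.add ([a] : PySem.Set Int) := by
      simp [PySem.Set.ofList, PySem.Set.add, PySem.Set.empty, PySem.Set.contains]
    rw [h0, key t h]
    rfl

-- ===== VERDICT (by name: the statement is the Claim_ definition above) =====
theorem intersection_row_spec : Claim_equal_intersection_row := by
  intro rows _ hpre
  obtain ⟨hne, -⟩ := hpre
  obtain ⟨r, rest, rfl⟩ := List.exists_cons_of_ne_nil hne
  unfold Spec_intersection_row intersection_row intersection_row_alt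
  simp only [List.headD_cons]
  congr 1
  funext acc i
  simp only [List.map_cons, List.headD_cons]
  have hiff : (PySem.Set.ofList (r.getD i 0 :: rest.map (fun row => row.getD i 0))).length = 1 ↔
      pvRowDiff r i (r :: rest) = false := by
    rw [ofList_len_one_iff, pvRowDiff_eq_false_iff]
    constructor
    · intro h item hitem
      rcases List.mem_cons.mp hitem with h1 | h2
      · simp [h1]
      · exact (h _ (List.mem_map_of_mem h2)).symm
    · intro h x hx
      obtain ⟨row, hrow, rfl⟩ := List.mem_map.mp hx
      exact (h row (by simp [hrow])).symm
  simp only [List.getD] at hiff ⊢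
  by_cases h : pvRowDiff r i (r :: rest) = true
  · simp only [h, if_true, List.append_cancel_left_eq, List.cons.injEq, and_true]
    rw [if_neg (fun hlen => by simp [hiff.mp hlen] at h)]
  · have hf : pvRowDiff r i (r :: rest) = false := by simpa using h
    simp only [hf, Bool.false_eq_true, if_false, List.append_cancel_left_eq, List.cons.injEq,
      and_true]
    rw [if_pos (hiff.mpr hf)]
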